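-- pv_equiv track=rewrite | github.com/01-Jacky/PracticeProblems | Python/c/zappo/1/submit.py | get_printout
-- ===== SOURCE A (Python) =====
-- def get_printout(min_coins):
--     freq_map = {}
--     for coin in min_coins:
--         if coin in freq_map:
--             freq_map[coin] += 1
--         else:
--             freq_map[coin] = 1
--
--     ratios = []
--     for coin, freq in sorted(freq_map.items()):
--         ratios.append('{}:{}'.format(freq, coin))
--
--     return ' '.join(ratios)
-- ===== SOURCE B (Python) =====
-- def get_printout(min_coins):
--     # sort once, then emit one "freq:coin" part per consecutive run
--     xs = sorted(min_coins)
--     parts = []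
--     i = 0
--     while i < len(xs):
--         j = i + 1
--         while j < len(xs) and xs[j] == xs[i]:
--             j += 1
--         parts.append('{}:{}'.format(j - i, xs[i]))
--         i = j
--     return ' '.join(parts)
-- ===== Notes on version B (the rewrite author's own statement) =====
-- stated objective: alternative
-- what changed: Replaces the dict-count-then-sort-items decomposition with a sort-then-scan: sort the list once and run-length-group consecutive equal coins in a single pass, with no dictionary at all.
import Mathlib
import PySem

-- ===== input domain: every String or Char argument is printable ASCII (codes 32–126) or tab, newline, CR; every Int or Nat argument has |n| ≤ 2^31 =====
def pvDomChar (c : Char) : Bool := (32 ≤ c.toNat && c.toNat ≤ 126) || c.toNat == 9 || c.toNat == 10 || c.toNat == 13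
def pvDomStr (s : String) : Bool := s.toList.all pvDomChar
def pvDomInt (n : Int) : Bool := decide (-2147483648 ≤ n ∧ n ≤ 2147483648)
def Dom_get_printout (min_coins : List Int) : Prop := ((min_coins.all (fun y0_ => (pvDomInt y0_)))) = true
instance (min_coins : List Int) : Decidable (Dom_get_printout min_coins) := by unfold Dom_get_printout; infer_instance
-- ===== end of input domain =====

-- B replaces A's dict-count-then-sort-keys decomposition by a sort-then-group-consecutive-runs scan (alternative algorithm, same cost).

-- ===== PORT A =====
def get_printout (min_coins : List Int) : String :=
  let freq_map := min_coins.foldl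
    (fun d coin => if d.contains coin then d.modify coin 0 (· + 1) else d.insert coin 1)
    (PySem.Dict.empty : PySem.Dict Int Int)
  -- sorted(freq_map.items()): dict keys are distinct, so Python's tuple sort is exactly the sort by the coin (first component)
  let ratios := (PySem.List.sorted freq_map.items (fun p => p.1) false).foldl
    (fun acc p => acc ++ [PySem.Str.join ":" [PySem.Int.toStr p.2, PySem.Int.toStr p.1]])
    ([] : List String)
  PySem.Str.join " " ratios

-- ===== PORT B =====
-- the outer while loop of Source B: state = (i, parts); the inner while advances j over the run of xs[i],
-- i.e. j = i + 1 + (length of the equal prefix of the elements after position i).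
-- fuel makes the loop structural; i strictly increases, so xs.length steps always suffice
def pvRuns (xs : List Int) : Nat → Nat → List String → List String
  | 0, _, parts => parts
  | fuel + 1, i, parts =>
    match xs.drop i with
    | [] => parts                                  -- i ≥ len(xs): the outer while stops
    | head :: t =>                                 -- head = xs[i]
      let j : Nat := i + 1 + (t.takeWhile (fun y => y == head)).length
      pvRuns xs fuel j
        (parts ++ [PySem.Str.join ":" [PySem.Int.toStr ((j - i : Nat) : Int), PySem.Int.toStr head]])

def get_printout_alt (min_coins : List Int) : String :=
  PySem.Str.join " " (pvRuns (PySem.List.sorted min_coins (fun x => x) false)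
    (PySem.List.sorted min_coins (fun x => x) false).length 0 [])

-- ===== PRECONDITION & SPEC =====
def Spec_get_printout (min_coins : List Int) (out : String) : Prop := out = get_printout_alt min_coins
instance (min_coins : List Int) (out : String) : Decidable (Spec_get_printout min_coins out) := by unfold Spec_get_printout; infer_instance

-- ===== CLAIM (what is proved, stated in full; the proofs are below) =====
def Claim_equal_get_printout : Prop := ∀ (min_coins : List Int), Dom_get_printout min_coins → Spec_get_printout min_coins (get_printout min_coins)

-- ===== LEMMAS AND PROOFS =====

-- the "freq:coin" formatter both ports produce
def pvFmt (freq coin : Int) : String := PySem.Str.join ":" [PySem.Int.toStr freq, PySem.Int.toStr coin]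

-- proof-side view of B's loop: the scan over the remaining suffix xs.drop i
def pvRunsList : List Int → List String → List String
  | [], parts => parts
  | head :: t, parts =>
    let same : Nat := 1 + (t.takeWhile (fun y => y == head)).length
    pvRunsList (t.drop (same - 1))
      (parts ++ [PySem.Str.join ":" [PySem.Int.toStr (same : Int), PySem.Int.toStr head]])
termination_by rest _ => rest.length
decreasing_by simp

-- B's index loop, run with enough fuel, is the suffix scan
lemma pv_runs_idx (xs : List Int) : ∀ (n i : Nat), xs.length - i ≤ n → ∀ (parts : List String),
    pvRuns xs n i parts = pvRunsList (xs.drop i) parts := by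
  intro n
  induction n with
  | zero =>
    intro i hn parts
    have hnil : xs.drop i = [] := List.drop_eq_nil_of_le (by omega)
    rw [pvRuns, hnil]
    simp [pvRunsList]
  | succ n ih =>
    intro i hn parts
    rw [pvRuns]
    split
    · next h => rw [h]; simp [pvRunsList]
    · next head t h =>
      have hlen := congrArg List.length h
      simp [List.length_drop] at hlen
      have hj : xs.drop (i + 1 + (t.takeWhile (fun y => y == head)).length)
          = t.drop ((t.takeWhile (fun y => y == head)).length) := by
        have h1 : i + 1 + (t.takeWhile (fun y => y == head)).length
            = i + (1 + (t.takeWhile (fun y => y == head)).length) := by omega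
        rw [h1, ← List.drop_drop, h,
          show 1 + (t.takeWhile (fun y => y == head)).length
            = (t.takeWhile (fun y => y == head)).length + 1 from Nat.add_comm _ _,
          List.drop_succ_cons]
      rw [ih _ (by omega), hj, h, pvRunsList]
      have harith : (((i + 1 + (t.takeWhile (fun y => y == head)).length - i : Nat)) : Int)
          = ((1 + (t.takeWhile (fun y => y == head)).length : Nat) : Int) := by
        congr 1
        omega
      simp only [harith, Nat.add_sub_cancel_left]

lemma pv_step_eq (d : PySem.Dict Int Int) (c : Int) :
    (if d.contains c then d.modify c 0 (· + 1) else d.insert c 1) = d.modify c 0 (· + 1) := by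
  by_cases h : d.contains c = true
  · simp [h]
  · simp only [Bool.not_eq_true] at h
    have hg : d.get? c = none := by
      have h2 := PySem.Dict.contains_eq_isSome_get? (d := d) (k := c)
      rw [h] at h2
      simpa using h2.symm
    simp [h, PySem.Dict.modify, PySem.Dict.getD, hg]

-- A's counting loop is Counter(min_coins)
lemma pv_freq_eq_counter (xs : List Int) :
    xs.foldl (fun d coin => if d.contains coin then d.modify coin 0 (· + 1) else d.insert coin 1)
      (PySem.Dict.empty : PySem.Dict Int Int) = PySem.Dict.counter xs := by
  rw [PySem.List.foldl_congr_mem xs _ (fun d x => d.modify x 0 (· + 1)) _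
    (fun acc x _ => pv_step_eq acc x)]
  exact (PySem.Dict.counter_eq_foldl xs).symm

-- foldl Set.add appends a sublist of the consumed list
lemma pv_foldl_add_sublist (l acc : List Int) :
    ∃ u, l.foldl PySem.Set.add acc = acc ++ u ∧ u.Sublist l := by
  induction l generalizing acc with
  | nil => exact ⟨[], by simp⟩
  | cons x l ih =>
    by_cases hx : x ∈ acc
    · obtain ⟨u, hu, hs⟩ := ih acc
      exact ⟨u, by simpa [List.foldl_cons, PySem.Set.add, PySem.Set.contains, hx] using hu,
        hs.cons x⟩
    · obtain ⟨u, hu, hs⟩ := ih (acc ++ [x])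
      refine ⟨x :: u, ?_, hs.cons₂ x⟩
      simpa [List.foldl_cons, PySem.Set.add, PySem.Set.contains, hx, List.append_assoc] using hu

lemma pv_dedup_sublist (s : List Int) : (PySem.List.dedup s).Sublist s := by
  obtain ⟨u, hu, hs⟩ := pv_foldl_add_sublist s []
  simpa [PySem.List.dedup_eq_ofList, PySem.Set.ofList_eq_foldl, hu] using hs

lemma pv_foldl_add_skip (l acc : List Int) (h : ∀ x ∈ l, x ∈ acc) :
    l.foldl PySem.Set.add acc = acc := by
  induction l with
  | nil => rfl
  | cons x l ih =>
    simp only [List.foldl_cons, PySem.Set.add, PySem.Set.contains]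
    have hx : x ∈ acc := h x (by simp)
    simp [hx]
    exact ih (fun y hy => h y (by simp [hy]))

lemma pv_foldl_add_cons (l : List Int) (a : Int) (acc : List Int) (h : a ∉ l) :
    l.foldl PySem.Set.add (a :: acc) = a :: l.foldl PySem.Set.add acc := by
  induction l generalizing acc with
  | nil => rfl
  | cons x l ih =>
    have hxa : x ≠ a := fun he => h (he ▸ List.mem_cons_self)
    have ha : a ∉ l := fun he => h (List.mem_cons_of_mem _ he)
    simp only [List.foldl_cons, PySem.Set.add, PySem.Set.contains]
    by_cases hx : x ∈ acc
    · simp [hx, hxa]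
      exact ih acc ha
    · simp [hx, hxa]
      exact ih (acc ++ [x]) ha

-- decomposition of dedup over a head run
lemma pv_dedup_run (head : Int) (t : List Int) (hhm : head ∉ t.dropWhile (fun y => y == head)) :
    PySem.List.dedup (head :: t) = head :: PySem.List.dedup (t.dropWhile (fun y => y == head)) := by
  have hw : ∀ x ∈ t.takeWhile (fun y => y == head), x = head := by
    intro x hx
    simpa using List.mem_takeWhile_imp hx
  simp only [PySem.List.dedup_eq_ofList, PySem.Set.ofList_eq_foldl]
  conv_lhs => rw [← List.takeWhile_append_dropWhile (p := fun y => y == head) (l := t)]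
  rw [List.foldl_cons, List.foldl_append]
  have h0 : PySem.Set.add [] head = [head] := rfl
  rw [h0, pv_foldl_add_skip _ [head] (fun x hx => by simp [hw x hx]),
    show ([head] : List Int) = head :: [] from rfl, pv_foldl_add_cons _ _ _ hhm]

-- on a (≤)-sorted tail, the run of the head is everything equal to it, and the head never reappears
lemma pv_head_not_mem_drop (head : Int) (t : List Int)
    (hs : (head :: t).Pairwise (· ≤ ·)) : head ∉ t.dropWhile (fun y => y == head) := by
  intro hmem
  set d := t.dropWhile (fun y => y == head) with hd
  have hdne : d ≠ [] := List.ne_nil_of_mem hmem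
  have hfirst : ((d.head hdne) == head) = false := List.head_dropWhile_not _ hdne
  have hfirst' : d.head hdne ≠ head := by simpa using hfirst
  -- head ≤ every element of t, hence ≤ d.head; d sorted gives d.head ≤ head since head ∈ d
  have hht : ∀ y ∈ t, head ≤ y := (List.pairwise_cons.mp hs).1
  have hdsub : d.Sublist t := List.dropWhile_sublist _
  have hdhead_le : head ≤ d.head hdne := hht _ (hdsub.mem (List.head_mem hdne))
  have hds : d.Pairwise (· ≤ ·) := (List.pairwise_cons.mp hs).2.sublist hdsub
  have hle : d.head hdne ≤ head := by
    match d, hdne, hmem, hds, hfirst' with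
    | e :: d', _, hmem, hds, hfirst' =>
      rcases List.mem_cons.mp hmem with h | h
      · exact le_of_eq h.symm
      · exact (List.pairwise_cons.mp hds).1 _ h
  exact hfirst' (le_antisymm hle hdhead_le)

-- the main B-side invariant: on a (≤)-sorted list, the run scan emits one part per distinct coin
lemma pv_runs_sorted (n : Nat) : ∀ (rest : List Int), rest.length ≤ n → ∀ (parts : List String),
    rest.Pairwise (· ≤ ·) →
    pvRunsList rest parts =
      parts ++ (PySem.List.dedup rest).map (fun k => pvFmt (rest.count k : Int) k) := by
  induction n with
  | zero =>
    intro rest hlen parts _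
    have : rest = [] := List.eq_nil_of_length_eq_zero (Nat.le_zero.mp hlen)
    subst this
    simp [pvRunsList, PySem.List.dedup]
  | succ n ih =>
    intro rest hlen parts hs
    match rest with
    | [] => simp [pvRunsList, PySem.List.dedup]
    | head :: t =>
      set w := t.takeWhile (fun y => y == head) with hwdef
      set d := t.dropWhile (fun y => y == head) with hddef
      have htwd : w ++ d = t := List.takeWhile_append_dropWhile
      have hw : ∀ x ∈ w, x = head := fun x hx => by simpa using List.mem_takeWhile_imp hx
      have hhm : head ∉ d := pv_head_not_mem_drop head t hs
      have hdrop : t.drop w.length = d := by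
        conv_lhs => rw [← htwd]
        rw [List.drop_left]
      have hds : d.Pairwise (· ≤ ·) :=
        (List.pairwise_cons.mp hs).2.sublist (List.dropWhile_sublist _)
      have hdlen : d.length ≤ n := by
        have h3 := (List.dropWhile_sublist (l := t) (p := fun y => y == head)).length_le
        rw [← hddef] at h3
        simp at hlen
        omega
      -- unfold one step of the loop
      rw [pvRunsList]
      simp only [Nat.add_sub_cancel_left, ← hwdef]
      rw [hdrop, ih d hdlen _ hds, pv_dedup_run head t (hddef ▸ hhm)]
      -- counts: the head's run is 1 + |w|; every other key's count lives in d
      have hcount_head : List.count head (head :: t) = 1 + w.length := by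
        have h1 : List.count head w = w.length := List.count_eq_length.mpr (fun b hb => (hw b hb).symm)
        have h2 : List.count head d = 0 := List.count_eq_zero.mpr hhm
        rw [List.count_cons_self, ← htwd, List.count_append, h1, h2]
        omega
      have hcount_tail : ∀ k ∈ PySem.List.dedup d, List.count k (head :: t) = List.count k d := by
        intro k hk
        have hkd : k ∈ d := (PySem.List.mem_dedup d k).mp hk
        have hkh : k ≠ head := fun he => hhm (he ▸ hkd)
        have h1 : List.count k w = 0 := List.count_eq_zero.mpr (fun hkw => hkh (hw k hkw))
        rw [List.count_cons_of_ne (Ne.symm hkh), ← htwd, List.count_append, h1, Nat.zero_add]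
      rw [List.map_cons, hcount_head]
      have htail : List.map (fun k => pvFmt ((List.count k (head :: t) : Nat) : Int) k) (PySem.List.dedup d)
          = List.map (fun k => pvFmt ((List.count k d : Nat) : Int) k) (PySem.List.dedup d) :=
        List.map_congr_left (fun k hk => by rw [hcount_tail k hk])
      rw [htail]
      simp [pvFmt, List.append_assoc]

lemma pv_dedup_pairwise_lt (s : List Int) (hs : s.Pairwise (· ≤ ·)) :
    (PySem.List.dedup s).Pairwise (· < ·) := by
  have h1 : (PySem.List.dedup s).Pairwise (· ≤ ·) := hs.sublist (pv_dedup_sublist s)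
  have h2 : (PySem.List.dedup s).Nodup := PySem.List.nodup_dedup s
  exact (h1.and h2).imp (fun h => lt_of_le_of_ne h.1 h.2)

lemma pv_dedup_sorted_eq (xs : List Int) :
    PySem.List.dedup (PySem.List.sorted xs (fun x => x) false) =
      PySem.List.sorted (PySem.Set.ofList xs) (fun x => x) false := by
  apply (PySem.List.sorted_eq_of_perm_of_pairwise_lt _ _ _ _ _).symm
  · rw [List.perm_ext_iff_of_nodup (PySem.List.nodup_dedup _) (PySem.Set.nodup_ofList xs)]
    intro a
    rw [PySem.List.mem_dedup, PySem.List.mem_sorted, PySem.Set.mem_ofList]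
  · exact pv_dedup_pairwise_lt _ (PySem.List.sorted_pairwise xs (fun x => x))

-- sorting the counter's items by coin = mapping the count over the sorted distinct coins
lemma pv_sorted_items (xs : List Int) :
    PySem.List.sorted ((PySem.Set.ofList xs).map (fun k => (k, (xs.count k : Int)))) (fun p => p.1) false
      = (PySem.List.sorted (PySem.Set.ofList xs) (fun x => x) false).map
          (fun k => (k, (xs.count k : Int))) := by
  apply PySem.List.sorted_eq_of_perm_of_pairwise_lt
  · exact (PySem.List.sorted_perm _ _ false).map _
  · rw [List.pairwise_map]
    exact PySem.List.sorted_ofList_pairwise_lt xs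

-- ===== VERDICT (by name: the statement is the Claim_ definition above) =====
theorem get_printout_spec : Claim_equal_get_printout := by
  intro xs _
  show get_printout xs = get_printout_alt xs
  rw [get_printout, get_printout_alt]
  simp only [pv_freq_eq_counter, PySem.Dict.items_counter, pv_sorted_items,
    PySem.List.foldl_append_singleton_eq_map, List.nil_append, List.map_map]
  rw [pv_runs_idx (PySem.List.sorted xs (fun x => x) false) (PySem.List.sorted xs (fun x => x) false).length 0 (by omega) [],
    List.drop_zero,
    pv_runs_sorted (PySem.List.sorted xs (fun x => x) false).length _ le_rfl []
    (PySem.List.sorted_pairwise xs (fun x => x)), pv_dedup_sorted_eq, List.nil_append]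
  apply congrArg
  apply List.map_congr_left
  intro k _
  simp [pvFmt, Function.comp, (PySem.List.sorted_perm xs (fun x => x) false).count_eq k]
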